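-- pv_equiv track=rewrite | github.com/ChiefsBestPal/Number-Theory-1-and-Bernoulli | NumberTheory 1; Bernouilli Num .py | pascals_bernoulli
-- ===== SOURCE A (Python) =====
-- def pascals_bernoulli(n):
--     Triangle = [] #@ see AntNotes page 2 for cool logic !
--     for ix_row in range(n):
--         row = [0 for _ in range(ix_row+1)]
--         row[0], row[-1] = 1,(ix_row+1)
--         if all(row):
--             pass
--         else:
--             for col in range(1, len(row)-1):
--                 row[col] = Triangle[ix_row-1][col-1] + Triangle[ix_row-1][col]
--         Triangle.append(row)
--     return [i for arr in Triangle for i in arr]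
-- ===== SOURCE B (Python) =====
-- def pascals_bernoulli(n):
--     # Each triangle entry is a binomial coefficient; emit the flattened list
--     # directly, computing each row multiplicatively (no triangle state kept).
--     flat = []
--     for ix_row in range(n):
--         entry = 1
--         for col in range(ix_row + 1):
--             flat.append(entry)
--             entry = entry * (ix_row + 1 - col) // (col + 1)
--     return flat
-- ===== Notes on version B (the rewrite author's own statement) =====
-- stated objective: alternative
-- what changed: B keeps no triangle and no previous row: each triangle entry is a binomial coefficient, so B emits the flattened output directly, generating each row's entries by the multiplicative running-product binomial formula.
import Mathlib
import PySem

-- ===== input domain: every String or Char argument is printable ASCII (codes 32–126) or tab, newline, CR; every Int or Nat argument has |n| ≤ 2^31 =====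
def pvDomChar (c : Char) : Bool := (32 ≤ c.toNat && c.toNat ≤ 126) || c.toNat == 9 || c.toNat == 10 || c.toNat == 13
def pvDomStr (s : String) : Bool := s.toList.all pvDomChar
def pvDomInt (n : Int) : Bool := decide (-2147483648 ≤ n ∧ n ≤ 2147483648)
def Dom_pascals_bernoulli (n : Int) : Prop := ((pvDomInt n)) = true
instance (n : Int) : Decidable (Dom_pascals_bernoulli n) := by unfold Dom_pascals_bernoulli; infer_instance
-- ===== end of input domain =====

-- B replaces A's row-by-row Pascal construction by the closed form T[i][j] = C(i+1, j) (simpler; no triangle state).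

-- ===== PORT A =====
-- one loop iteration of A: build row ix_row from the triangle accumulated so far
def pvRowA (Triangle : List (List Int)) (ix_row : Int) : List Int :=
  let row := (PySem.List.pyRange 0 (ix_row + 1) 1).map (fun _ => (0 : Int))
  let row := PySem.List.pySetD row 0 1
  let row := PySem.List.pySetD row (-1) (ix_row + 1)
  if row.all (fun x => x ≠ 0) then row
  else
    (PySem.List.pyRange 1 ((row.length : Int) - 1) 1).foldl
      (fun r col =>
        PySem.List.pySetD r col
          (PySem.List.pyGetD (PySem.List.pyGetD Triangle (ix_row - 1) []) (col - 1) 0 +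
           PySem.List.pyGetD (PySem.List.pyGetD Triangle (ix_row - 1) []) col 0)) row

def pascals_bernoulli (n : Int) : List Int :=
  ((PySem.List.pyRange 0 n 1).foldl (fun T ix_row => T ++ [pvRowA T ix_row]) []).flatMap id

-- ===== PORT B =====
def pascals_bernoulli_alt (n : Int) : List Int :=
  (PySem.List.pyRange 0 n 1).foldl (fun flat ix_row =>
    ((PySem.List.pyRange 0 (ix_row + 1) 1).foldl
      (fun (p : List Int × Int) col =>
        (p.1 ++ [p.2], PySem.Int.floordiv (p.2 * (ix_row + 1 - col)) (col + 1)))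
      (flat, 1)).1) []

-- ===== PRECONDITION & SPEC =====
def Spec_pascals_bernoulli (n : Int) (out : List Int) : Prop := out = pascals_bernoulli_alt n
instance (n : Int) (out : List Int) : Decidable (Spec_pascals_bernoulli n out) := by unfold Spec_pascals_bernoulli; infer_instance

-- ===== CLAIM (what is proved, stated in full; the proofs are below) =====
def Claim_equal_pascals_bernoulli : Prop := ∀ (n : Int), Dom_pascals_bernoulli n → Spec_pascals_bernoulli n (pascals_bernoulli n)

-- ===== LEMMAS AND PROOFS =====

-- row i of the mathematical triangle
def pvPRow (i : Nat) : List Int := (List.range (i + 1)).map (fun j => (Nat.choose (i + 1) j : Int))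

def pvTri (m : Nat) : List (List Int) := (List.range m).map pvPRow

theorem pvPRow_length (i : Nat) : (pvPRow i).length = i + 1 := by simp [pvPRow]

theorem pvSetLast (L : List Int) (v : Int) (h : L.length ≠ 0) :
    PySem.List.pySetD L (-1) v = L.set (L.length - 1) v := by
  simp only [PySem.List.pySetD, PySem.List.pySet?, PySem.List.pyIdx?]
  split_ifs with h1 h2 h3 <;> simp_all

-- characterization of the inner column-filling fold (pointwise)
theorem pvFoldSet (f : Int → Int) :
    ∀ (k : Nat) (a b : Int), 0 ≤ a → (b - a).toNat = k → ∀ (L : List Int),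
      ((PySem.List.pyRange a b 1).foldl (fun r col => PySem.List.pySetD r col (f col)) L) =
        (List.range L.length).map
          (fun (j : Nat) => if a ≤ (j : Int) ∧ (j : Int) < b then f (j : Int) else L.getD j 0) := by
  intro k
  induction k with
  | zero =>
    intro a b ha hk L
    rw [PySem.List.pyRange_one_eq_nil (by omega)]
    simp only [List.foldl_nil]
    apply List.ext_getElem (by simp)
    intro j h1 h2
    simp only [List.getElem_map, List.getElem_range]
    rw [if_neg (by omega), List.getD_eq_getElem _ _ h1]
  | succ k ih =>
    intro a b ha hk L
    rw [PySem.List.pyRange_one_cons (by omega)]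
    simp only [List.foldl_cons]
    rw [PySem.List.pySetD_of_nonneg _ _ ha,
        ih (a + 1) b (by omega) (by omega) (L.set a.toNat (f a))]
    apply List.ext_getElem (by simp)
    intro j h1 h2
    simp only [List.length_map, List.length_range, List.length_set] at h1 h2
    simp only [List.getElem_map, List.getElem_range]
    by_cases hja : (j : Int) = a
    · have hj' : j = a.toNat := by omega
      rw [if_neg (by omega), if_pos (by omega)]
      subst hj'
      rw [List.getD_eq_getElem _ _ (by simpa using h1), List.getElem_set_self]
      exact (congrArg f hja.symm)
    · have hgd : (L.set a.toNat (f a)).getD j 0 = L.getD j 0 := by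
        by_cases hjl : j < L.length
        · rw [List.getD_eq_getElem _ _ (by simpa using hjl),
              List.getD_eq_getElem _ _ hjl, List.getElem_set_ne (by omega)]
        · rw [List.getD_eq_default _ _ (by simpa using hjl),
              List.getD_eq_default _ _ (by omega)]
      rw [hgd]
      congr 1
      simp only [eq_iff_iff]
      omega

theorem pvGetD_pvPRow (i : Nat) (j : Nat) (hj : j < i + 1) :
    PySem.List.pyGetD (pvPRow i) ((j : Nat) : Int) 0 = (Nat.choose (i + 1) j : Int) := by
  rw [PySem.List.pyGetD_natCast, pvPRow, List.getD_eq_getElem _ _ (by simpa using hj)]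
  simp

-- the row A builds at step i from the correct triangle prefix is the binomial row
theorem pvRowA_eq (i : Nat) : pvRowA (pvTri i) (i : Nat) = pvPRow i := by
  match i with
  | 0 => decide
  | 1 => decide
  | (m + 2) =>
    set i := m + 2 with hidef
    simp only [pvRowA]
    have hcast : ((i : Int) + 1) = ((i + 1 : Nat) : Int) := by push_cast; ring
    have hzeros : ((PySem.List.pyRange 0 ((i : Int) + 1) 1).map (fun _ => (0 : Int)))
        = List.replicate (i + 1) (0 : Int) := by
      rw [hcast, PySem.List.pyRange_zero_natCast, List.map_map, List.eq_replicate_iff]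
      constructor
      · simp
      · intro b hb
        simp at hb
        exact hb.2.symm
    set base : List Int := ((List.replicate (i + 1) (0 : Int)).set 0 1).set i ((i : Int) + 1)
      with hbase
    have hlenbase : base.length = i + 1 := by simp [hbase]
    have hL0 : PySem.List.pySetD (PySem.List.pySetD
          ((PySem.List.pyRange 0 ((i : Int) + 1) 1).map (fun _ => (0 : Int))) 0 1)
          (-1) ((i : Int) + 1) = base := by
      rw [hzeros]
      rw [pvSetLast _ _ (by simp [PySem.List.length_pySetD])]
      rw [PySem.List.pySetD_of_nonneg _ _ (by omega)]
      simp [hbase]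
    have hbaseget : ∀ (j : Nat) (h : j < i + 1),
        base[j]'(by omega) = if j = 0 then 1 else if j = i then (i : Int) + 1 else 0 := by
      intro j h
      simp only [hbase]
      rw [List.getElem_set, List.getElem_set]
      simp only [List.getElem_replicate]
      split_ifs <;> omega
    rw [hL0]
    have hall : ¬ (base.all (fun x => decide (x ≠ 0)) = true) := by
      intro h
      have h1 : base[1]'(by omega) ∈ base := List.getElem_mem _
      have := List.all_eq_true.mp h _ h1
      rw [hbaseget 1 (by omega)] at this
      simp only [if_neg (by omega : ¬ (1:Nat) = 0), if_neg (by omega : ¬ (1:Nat) = i)] at this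
      simp at this
    rw [if_neg hall]
    -- the previous row in the accumulated triangle
    have hprev : PySem.List.pyGetD (pvTri i) ((i : Int) - 1) [] = pvPRow (i - 1) := by
      have : ((i : Int) - 1) = ((i - 1 : Nat) : Int) := by push_cast [hidef]; ring
      rw [this, PySem.List.pyGetD_natCast, pvTri,
          List.getD_eq_getElem _ _ (by simp only [List.length_map, List.length_range]; omega)]
      simp
    simp only [hprev, hlenbase]
    rw [pvFoldSet _ ((((i + 1 : Nat) : Int) - 1) - 1).toNat 1 (((i + 1 : Nat) : Int) - 1)
          (by omega) rfl base]
    apply List.ext_getElem (by simp [hlenbase, pvPRow_length])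
    intro j h1 h2
    simp only [hlenbase, List.length_map, List.length_range] at h1
    simp only [List.getElem_map, List.getElem_range]
    have hj : j < i + 1 := h1
    by_cases hmid : 1 ≤ j ∧ j < i
    · rw [if_pos (by push_cast; omega)]
      have hsub : ((j : Nat) : Int) - 1 = ((j - 1 : Nat) : Int) := by push_cast [hmid.1]; omega
      have him1 : i - 1 = m + 1 := by omega
      rw [hsub, pvGetD_pvPRow _ _ (by omega), pvGetD_pvPRow _ _ (by omega), him1]
      have hjj : j - 1 + 1 = j := by omega
      have hpascal : Nat.choose (m + 2) (j - 1) + Nat.choose (m + 2) (j - 1 + 1)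
          = Nat.choose (m + 3) (j - 1 + 1) := (Nat.choose_succ_succ' (m + 2) (j - 1)).symm ▸ by
        rw [Nat.choose_succ_succ]
      have : (pvPRow i)[j]'h2 = (Nat.choose (i + 1) j : Int) := by simp [pvPRow]
      rw [this]
      have : i + 1 = m + 3 := by omega
      rw [this, ← hjj, ← hpascal]
      push_cast
      ring
    · rw [if_neg (by push_cast; omega)]
      rw [List.getD_eq_getElem _ _ (by omega), hbaseget j hj]
      have : (pvPRow i)[j]'h2 = (Nat.choose (i + 1) j : Int) := by simp [pvPRow]
      rw [this]
      rcases (by omega : j = 0 ∨ j = i) with h | h <;> subst h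
      · simp
      · rw [if_neg (by omega), if_pos rfl, Nat.choose_succ_self_right]
        push_cast
        ring

-- A's triangle fold builds exactly the binomial triangle
theorem pvTriFold : ∀ (N : Nat),
    ((PySem.List.pyRange 0 (N : Int) 1).foldl (fun T ix => T ++ [pvRowA T ix]) [])
      = pvTri N := by
  intro N
  induction N with
  | zero =>
    rw [PySem.List.pyRange_one_eq_nil (by omega)]
    simp [pvTri]
  | succ N ih =>
    have hc : ((N + 1 : Nat) : Int) = (N : Int) + 1 := by push_cast; ring
    rw [hc, PySem.List.pyRange_one_succ_right (by omega), List.foldl_append, ih]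
    simp only [List.foldl_cons, List.foldl_nil]
    rw [pvRowA_eq]
    simp [pvTri, List.range_succ]

-- B's inner multiplicative loop writes the binomial row entries
theorem pvInner (i : Nat) : ∀ (k c : Nat), c + k = i + 1 → ∀ (acc : List Int),
    ((PySem.List.pyRange (c : Int) ((i : Int) + 1) 1).foldl
      (fun (p : List Int × Int) col =>
        (p.1 ++ [p.2], PySem.Int.floordiv (p.2 * ((i : Int) + 1 - col)) (col + 1)))
      (acc, (Nat.choose (i + 1) c : Int))).1
    = acc ++ (List.range k).map (fun t => (Nat.choose (i + 1) (c + t) : Int)) := by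
  intro k
  induction k with
  | zero =>
    intro c hc acc
    rw [PySem.List.pyRange_one_eq_nil (by omega)]
    simp
  | succ k ih =>
    intro c hc acc
    rw [PySem.List.pyRange_one_cons (by omega)]
    simp only [List.foldl_cons]
    have hstep : PySem.Int.floordiv ((Nat.choose (i + 1) c : Int) * ((i : Int) + 1 - (c : Int)))
        ((c : Int) + 1) = (Nat.choose (i + 1) (c + 1) : Int) := by
      have h1 : ((i : Int) + 1 - (c : Int)) = ((i + 1 - c : Nat) : Int) := by omega
      have h2 : ((c : Int) + 1) = ((c + 1 : Nat) : Int) := by push_cast; ring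
      rw [h1, h2, ← Nat.cast_mul, PySem.Int.floordiv_natCast]
      congr 1
      rw [← Nat.choose_succ_right_eq, Nat.mul_div_cancel _ (by omega)]
    have hc1 : ((c : Int) + 1) = ((c + 1 : Nat) : Int) := by push_cast; ring
    rw [hstep, hc1, ih (c + 1) (by omega) (acc ++ [(Nat.choose (i + 1) c : Int)])]
    rw [List.append_assoc, List.range_succ_eq_map, List.map_cons, List.map_map]
    simp only [Nat.add_zero, List.singleton_append]
    congr 1
    congr 1
    apply List.map_congr_left
    intro t ht
    simp only [Function.comp_apply]
    have h : c + 1 + t = c + Nat.succ t := by omega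
    rw [h]

-- B's outer fold flattens the binomial triangle
theorem pvAltFold : ∀ (N : Nat),
    ((PySem.List.pyRange 0 (N : Int) 1).foldl (fun flat ix_row =>
      ((PySem.List.pyRange 0 (ix_row + 1) 1).foldl
        (fun (p : List Int × Int) col =>
          (p.1 ++ [p.2], PySem.Int.floordiv (p.2 * (ix_row + 1 - col)) (col + 1)))
        (flat, 1)).1) [])
      = ((List.range N).map pvPRow).flatten := by
  intro N
  induction N with
  | zero =>
    rw [PySem.List.pyRange_one_eq_nil (by omega)]
    simp
  | succ N ih =>
    have hc : ((N + 1 : Nat) : Int) = (N : Int) + 1 := by push_cast; ring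
    rw [hc, PySem.List.pyRange_one_succ_right (by omega), List.foldl_append, ih]
    simp only [List.foldl_cons, List.foldl_nil]
    have := pvInner N (N + 1) 0 (by omega) (((List.range N).map pvPRow).flatten)
    simp only [Nat.cast_zero, Nat.choose_zero_right, Nat.cast_one] at this
    rw [this]
    conv_rhs => rw [List.range_succ, List.map_append, List.flatten_append]
    congr 1
    simp [pvPRow]

-- ===== VERDICT (by name: the statement is the Claim_ definition above) =====
theorem pascals_bernoulli_spec : Claim_equal_pascals_bernoulli := by
  intro n _
  unfold Spec_pascals_bernoulli pascals_bernoulli pascals_bernoulli_alt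
  by_cases hn : n ≤ 0
  · rw [PySem.List.pyRange_one_eq_nil hn]
    simp
  · have hN : n = ((n.toNat : Nat) : Int) := by omega
    rw [hN, pvTriFold, pvAltFold]
    simp [pvTri]
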